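-- pv_equiv track=rewrite | github.com/coastalcph/eacl2021-morpherror | scripts/process_parseme2018.py | find_mwes
-- ===== SOURCE A (Python) =====
-- def find_mwes(sentence):
--     mwes = {}
--     for i, token in enumerate(sentence):
--         if token[-1] in ("", "_", "*"):
--             continue
--         for expression in token[-1].split(";"):
--             if ":" in expression:
--                 id_, mwe_type = expression.split(":")
--             else:
--                 id_, mwe_type = expression, None
--
--             if id_ in mwes:
--                 mwes[id_][1].add(i)
--                 if mwes[id_][0] is None and mwe_type is not None:
--                     mwes[id_] = (mwe_type, mwes[id_][1])
--             else:
--                 mwes[id_] = (mwe_type, set([i]))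
--
--     return mwes
-- ===== SOURCE B (Python) =====
-- def find_mwes(sentence):
--     # Pass 1: flatten every annotated expression into a (id_, type_or_None, token_index) triple.
--     triples = []
--     for i, token in enumerate(sentence):
--         field = token[-1]
--         if field in ("", "_", "*"):
--             continue
--         for expression in field.split(";"):
--             if ":" in expression:
--                 id_, mwe_type = expression.split(":")
--             else:
--                 id_, mwe_type = expression, None
--             triples.append((id_, mwe_type, i))
--     # Pass 2: for each id in first-appearance order, gather its data by scanning the triples.
--     result = {}
--     for id_, _, _ in triples:
--         if id_ not in result:
--             first_type = next((t for (k, t, _) in triples if k == id_ and t is not None), None)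
--             indices = {j for (k, _, j) in triples if k == id_}
--             result[id_] = (first_type, indices)
--     return result
-- ===== Notes on version B (the rewrite author's own statement) =====
-- stated objective: alternative
-- what changed: A builds the result dict in a single online pass, mutating per-id state (set.add, conditional type overwrite) at every expression; B first flattens the sentence into a flat list of (id, type, index) triples and then, for each id in first-appearance order, derives its entry declaratively by scanning the triples (first non-None type via next(), index set via a comprehension), with no incremental per-id mutation.
import Mathlib
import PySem

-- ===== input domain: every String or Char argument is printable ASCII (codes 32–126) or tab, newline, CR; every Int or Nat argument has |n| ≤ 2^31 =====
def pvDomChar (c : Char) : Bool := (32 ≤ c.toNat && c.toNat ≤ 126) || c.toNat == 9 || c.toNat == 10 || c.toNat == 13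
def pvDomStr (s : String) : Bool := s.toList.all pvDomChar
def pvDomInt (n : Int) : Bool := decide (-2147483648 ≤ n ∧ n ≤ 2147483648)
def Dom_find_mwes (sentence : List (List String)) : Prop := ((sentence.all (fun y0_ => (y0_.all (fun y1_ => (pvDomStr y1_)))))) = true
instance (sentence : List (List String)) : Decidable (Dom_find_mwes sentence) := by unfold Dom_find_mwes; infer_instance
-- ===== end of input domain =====

-- B replaces A's single online dict-building pass by flatten-to-triples + per-id declarative
-- aggregation (no incremental per-id mutation); not faster, an alternative decomposition.

-- shared parsing helper: the two Pythons contain this identical snippet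
-- ("id_, mwe_type = expression.split(':')" / "expression, None").
-- The `_ => (e, none)` arm is unreachable under Pre_ (Python raises ValueError there).
def pvParse (e : String) : String × Option String :=
  if PySem.Str.isIn ":" e then
    match (PySem.Str.split? e ":").getD [e] with
    | [a, b] => (a, some b)
    | _ => (e, none)
  else (e, none)

-- ===== PORT A =====
-- the body of A's inner loop (the dict update for one parsed expression), as a helper
def pvAstep (mwes : PySem.Dict String (Option String × List Int))
    (tr : String × Option String × Int) : PySem.Dict String (Option String × List Int) :=
  match mwes.get? tr.1 with
  | some ts =>
      -- mwes[id_][1].add(i)  (in-place: written back)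
      let s' := PySem.Set.add ts.2 tr.2.2
      let m' := mwes.insert tr.1 (ts.1, s')
      if ts.1 = none ∧ tr.2.1 ≠ none then m'.insert tr.1 (tr.2.1, s') else m'
  | none => mwes.insert tr.1 (tr.2.1, PySem.Set.ofList [tr.2.2])

def find_mwes (sentence : List (List String)) : List (String × Option String × List Int) :=
  ((PySem.List.enumerate sentence).foldl (fun mwes p =>
      let last := PySem.List.pyGetD p.2 (-1) ""      -- token[-1]; IndexError (token = []) excluded by Pre_
      if last = "" ∨ last = "_" ∨ last = "*" then mwes
      else ((PySem.Str.split? last ";").getD [last]).foldl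
            (fun mwes e => pvAstep mwes ((pvParse e).1, (pvParse e).2, p.1)) mwes)
    PySem.Dict.empty).items

-- ===== PORT B =====
-- the body of B's second loop, as a helper taking the triples list
def pvBstep (triples : List (String × Option String × Int))
    (result : PySem.Dict String (Option String × List Int))
    (tr : String × Option String × Int) : PySem.Dict String (Option String × List Int) :=
  if result.contains tr.1 then result
  else result.insert tr.1
    ((triples.filterMap (fun q => if q.1 == tr.1 then q.2.1 else none)).head?,
     PySem.Set.ofList (triples.filterMap (fun q => if q.1 == tr.1 then some q.2.2 else none)))

def find_mwes_alt (sentence : List (List String)) : List (String × Option String × List Int) :=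
  let triples : List (String × Option String × Int) :=
    (PySem.List.enumerate sentence).foldl (fun acc p =>
      let field := PySem.List.pyGetD p.2 (-1) ""
      if field = "" ∨ field = "_" ∨ field = "*" then acc
      else acc ++ ((PySem.Str.split? field ";").getD [field]).map
            (fun e => ((pvParse e).1, (pvParse e).2, p.1))) []
  (triples.foldl (pvBstep triples) PySem.Dict.empty).items

-- ===== PRECONDITION & SPEC =====
-- Pre_ excludes exactly the inputs where Python A raises: an empty token (token[-1] is an
-- IndexError) or an expression containing two or more ':' (expression.split(':') then raises
-- ValueError on unpacking).  B raises identically there.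
def Pre_find_mwes (sentence : List (List String)) : Prop :=
  ∀ token ∈ sentence, token ≠ [] ∧
    ∀ e ∈ (PySem.Str.split? (PySem.List.pyGetD token (-1) "") ";").getD
            [PySem.List.pyGetD token (-1) ""],
      PySem.Str.count e ":" ≤ 1
instance (sentence : List (List String)) : Decidable (Pre_find_mwes sentence) := by
  unfold Pre_find_mwes; infer_instance

def pvWitness_find_mwes : List (List String) :=
  [["The", "1:VID"], ["cat", "_"], ["kicked", "1;2:LVC.full"], ["it", "2"]]

def Spec_find_mwes (sentence : List (List String)) (out : List (String × Option String × List Int)) : Prop := out = find_mwes_alt sentence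
instance (sentence : List (List String)) (out : List (String × Option String × List Int)) : Decidable (Spec_find_mwes sentence out) := by unfold Spec_find_mwes; infer_instance

-- ===== CLAIM (what is proved, stated in full; the proofs are below) =====
def Claim_equal_find_mwes : Prop := ∀ (sentence : List (List String)), Dom_find_mwes sentence → Pre_find_mwes sentence → Spec_find_mwes sentence (find_mwes sentence)

-- ===== LEMMAS AND PROOFS =====

-- the triples contributed by one enumerated token
def pvTok (p : Int × List String) : List (String × Option String × Int) :=
  let field := PySem.List.pyGetD p.2 (-1) ""
  if field = "" ∨ field = "_" ∨ field = "*" then []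
  else ((PySem.Str.split? field ";").getD [field]).map (fun e => ((pvParse e).1, (pvParse e).2, p.1))

-- canonical per-id value read off a triples list: first non-None type, set of indices
def pvF (ts : List (String × Option String × Int)) (id : String) : Option String × List Int :=
  ((ts.filterMap (fun q => if q.1 == id then q.2.1 else none)).head?,
   PySem.Set.ofList (ts.filterMap (fun q => if q.1 == id then some q.2.2 else none)))

-- canonical grouped form: ids of p in first-appearance order, values read from ts
def pvMap (ts p : List (String × Option String × Int)) : List (String × Option String × List Int) :=
  (PySem.Set.ofList (p.map (·.1))).map (fun id => (id, pvF ts id))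

theorem pvBstep_eq (ts : List (String × Option String × Int))
    (r : PySem.Dict String (Option String × List Int)) (tr : String × Option String × Int) :
    pvBstep ts r tr = if r.contains tr.1 then r else r.insert tr.1 (pvF ts tr.1) := rfl

theorem pv_get?_mk_map {ν : Type} (L : List String) (f : String → ν) (x : String)
    (h : L.Nodup) :
    (PySem.Dict.mk (L.map (fun k => (k, f k)))).get? x
      = if x ∈ L then some (f x) else none := by
  induction L with
  | nil => simp [PySem.Dict.get?]
  | cons k L ih =>
    simp only [List.map_cons, PySem.Dict.get?_mk_cons]
    rcases List.nodup_cons.mp h with ⟨hk, hL⟩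
    by_cases hx : k = x
    · subst hx; simp
    · simp only [beq_iff_eq, hx, if_false, ih hL]
      simp [List.mem_cons, Ne.symm hx]

theorem pvF_append_ne (p : List (String × Option String × Int)) (id k : String)
    (t : Option String) (i : Int) (hne : k ≠ id) :
    pvF (p ++ [(id, t, i)]) k = pvF p k := by
  simp [pvF, List.filterMap_append, beq_iff_eq, hne.symm]

theorem pvF_append_self (p : List (String × Option String × Int)) (id : String)
    (t : Option String) (i : Int) :
    pvF (p ++ [(id, t, i)]) id
      = ((pvF p id).1.or t, PySem.Set.add (pvF p id).2 i) := by
  simp only [pvF, List.filterMap_append, List.filterMap_cons, List.filterMap_nil, beq_self_eq_true,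
    if_true, List.head?_append, PySem.Set.ofList_append_singleton]
  cases t <;> simp [Option.or]

theorem pvF_not_mem (p : List (String × Option String × Int)) (id : String)
    (h : id ∉ p.map (·.1)) : pvF p id = (none, []) := by
  have h1 : p.filterMap (fun q => if q.1 == id then q.2.1 else none) = [] := by
    refine List.filterMap_eq_nil_iff.mpr ?_
    intro q hq
    have : q.1 ≠ id := fun he => h (he ▸ List.mem_map_of_mem hq)
    simp [this]
  have h2 : p.filterMap (fun q => if q.1 == id then some q.2.2 else none) = ([] : List Int) := by
    refine List.filterMap_eq_nil_iff.mpr ?_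
    intro q hq
    have : q.1 ≠ id := fun he => h (he ▸ List.mem_map_of_mem hq)
    simp [this]
  rw [pvF, h1, h2]
  rfl

theorem pv_dict_eta (d : PySem.Dict String (Option String × List Int)) :
    d = PySem.Dict.mk d.items := rfl

theorem pv_get?_pvMap (ts p : List (String × Option String × Int)) (id : String) :
    (PySem.Dict.mk (pvMap ts p)).get? id
      = if id ∈ PySem.Set.ofList (p.map (·.1)) then some (pvF ts id) else none :=
  pv_get?_mk_map _ _ _ (PySem.Set.nodup_ofList _)

theorem pv_contains_pvMap (ts p : List (String × Option String × Int)) (id : String) :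
    (PySem.Dict.mk (pvMap ts p)).contains id
      = decide (id ∈ PySem.Set.ofList (p.map (·.1))) := by
  rw [PySem.Dict.contains_eq_isSome_get?, pv_get?_pvMap]
  by_cases hm : id ∈ PySem.Set.ofList (p.map (·.1)) <;> simp [hm]

-- B's grouping fold computes the canonical grouped form
theorem pvB_invariant (ts p : List (String × Option String × Int)) :
    p.foldl (pvBstep ts) PySem.Dict.empty = PySem.Dict.mk (pvMap ts p) := by
  induction p using List.reverseRecOn with
  | nil => simp [pvMap, PySem.Set.ofList, PySem.Dict.empty]
  | append_singleton p x ih =>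
    obtain ⟨id, t, i⟩ := x
    rw [List.foldl_append, List.foldl_cons, List.foldl_nil, ih, pvBstep_eq, pv_contains_pvMap]
    by_cases hm : id ∈ p.map (·.1)
    · have hm' : id ∈ PySem.Set.ofList (p.map (·.1)) := (PySem.Set.mem_ofList _ _).mpr hm
      simp only [hm', decide_true, if_true]
      have : pvMap ts (p ++ [(id, t, i)]) = pvMap ts p := by
        simp only [pvMap, List.map_append, List.map_cons, List.map_nil,
          PySem.Set.ofList_append_singleton, PySem.Set.add_of_mem hm']
      rw [this]
    · have hm' : id ∉ PySem.Set.ofList (p.map (·.1)) := fun h => hm ((PySem.Set.mem_ofList _ _).mp h)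
      simp only [hm', decide_false, Bool.false_eq_true, if_false]
      rw [pv_dict_eta ((PySem.Dict.mk (pvMap ts p)).insert id (pvF ts id))]
      have hc : (PySem.Dict.mk (pvMap ts p)).contains id = false := by
        rw [pv_contains_pvMap]; simp [hm']
      rw [PySem.Dict.items_insert_of_not_contains _ _ hc]
      simp only [pvMap, List.map_append, List.map_cons, List.map_nil,
        PySem.Set.ofList_append_singleton, PySem.Set.add_of_not_mem hm', List.map_append,
        List.map_cons, List.map_nil]

-- A's online dict fold computes the same canonical grouped form (read from the prefix itself)
theorem pvA_invariant (p : List (String × Option String × Int)) :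
    p.foldl pvAstep PySem.Dict.empty = PySem.Dict.mk (pvMap p p) := by
  induction p using List.reverseRecOn with
  | nil => simp [pvMap, PySem.Set.ofList, PySem.Dict.empty]
  | append_singleton p x ih =>
    obtain ⟨id, t, i⟩ := x
    rw [List.foldl_append, List.foldl_cons, List.foldl_nil, ih]
    unfold pvAstep
    rw [pv_get?_pvMap]
    by_cases hm : id ∈ p.map (·.1)
    · have hm' : id ∈ PySem.Set.ofList (p.map (·.1)) := (PySem.Set.mem_ofList _ _).mpr hm
      simp only [hm', if_true]
      have hkeys : PySem.Set.ofList ((p ++ [(id, t, i)]).map (·.1))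
          = PySem.Set.ofList (p.map (·.1)) := by
        simp only [List.map_append, List.map_cons, List.map_nil,
          PySem.Set.ofList_append_singleton, PySem.Set.add_of_mem hm']
      have hc : (PySem.Dict.mk (pvMap p p)).contains id = true := by
        rw [pv_contains_pvMap]; simp [hm']
      set t0 := (pvF p id).1 with ht0
      set s := (pvF p id).2 with hs
      set s' := PySem.Set.add s i with hs'
      -- items of the first insert
      have h1 : ((PySem.Dict.mk (pvMap p p)).insert id (t0, s'))
          = PySem.Dict.mk ((PySem.Set.ofList (p.map (·.1))).map
              (fun k => (k, if k = id then (t0, s') else pvF p k))) := by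
        refine (pv_dict_eta _).trans (congrArg PySem.Dict.mk ?_)
        rw [PySem.Dict.items_insert_of_contains _ _ hc]
        show List.map _ (List.map _ _) = _
        rw [List.map_map]
        refine List.map_congr_left ?_
        intro k hk
        by_cases hki : k = id <;> simp [hki]
      have hfinal : (if t0 = none ∧ t ≠ none
            then ((PySem.Dict.mk (pvMap p p)).insert id (t0, s')).insert id (t, s')
            else (PySem.Dict.mk (pvMap p p)).insert id (t0, s'))
          = PySem.Dict.mk ((PySem.Set.ofList (p.map (·.1))).map
              (fun k => (k, if k = id then (t0.or t, s') else pvF p k))) := by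
        by_cases hcond : t0 = none ∧ t ≠ none
        · rw [if_pos hcond, h1]
          have hc2 : (PySem.Dict.mk ((PySem.Set.ofList (p.map (·.1))).map
              (fun k => (k, if k = id then (t0, s') else pvF p k)))).contains id = true := by
            rw [PySem.Dict.contains_eq_isSome_get?,
              pv_get?_mk_map _ _ _ (PySem.Set.nodup_ofList _)]
            simp [hm']
          refine (pv_dict_eta _).trans (congrArg PySem.Dict.mk ?_)
          rw [PySem.Dict.items_insert_of_contains _ _ hc2]
          show List.map _ (List.map _ _) = _
          rw [List.map_map]
          refine List.map_congr_left ?_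
          intro k hk
          obtain ⟨h0, hts⟩ := hcond
          by_cases hki : k = id <;> simp [hki, h0, Option.or]
        · rw [if_neg hcond, h1]
          refine congrArg PySem.Dict.mk (List.map_congr_left ?_)
          intro k hk
          by_cases hki : k = id
          · subst hki
            have : t0.or t = t0 := by
              rcases h0 : t0 with _ | y
              · have : t = none := by
                  by_contra hne
                  exact hcond ⟨h0, hne⟩
                simp [this, Option.or]
              · simp [Option.or]
            simp [this]
          · simp [hki]
      rw [hfinal]
      simp only [pvMap, List.map_append, List.map_cons, List.map_nil,
        PySem.Set.ofList_append_singleton, PySem.Set.add_of_mem hm']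
      refine congrArg PySem.Dict.mk (List.map_congr_left ?_)
      intro k hk
      by_cases hki : k = id
      · subst hki
        rw [pvF_append_self, if_pos rfl]
      · rw [pvF_append_ne _ _ _ _ _ hki]
        simp [hki]
    · have hm' : id ∉ PySem.Set.ofList (p.map (·.1)) := fun h => hm ((PySem.Set.mem_ofList _ _).mp h)
      simp only [hm', if_false]
      have hc : (PySem.Dict.mk (pvMap p p)).contains id = false := by
        rw [pv_contains_pvMap]; simp [hm']
      refine (pv_dict_eta _).trans (congrArg PySem.Dict.mk ?_)
      rw [PySem.Dict.items_insert_of_not_contains _ _ hc]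
      simp only [pvMap, List.map_append, List.map_cons, List.map_nil,
        PySem.Set.ofList_append_singleton, PySem.Set.add_of_not_mem hm']
      congr 1
      · refine List.map_congr_left ?_
        intro k hk
        have hki : k ≠ id := by
          intro h; exact hm' (h ▸ hk)
        rw [pvF_append_ne _ _ _ _ _ hki]
      · rw [pvF_append_self, pvF_not_mem _ _ hm]
        rfl

-- both first passes produce the flat triples list ∑ pvTok
theorem pvB_triples (l : List (Int × List String)) (acc : List (String × Option String × Int)) :
    l.foldl (fun acc p =>
      let field := PySem.List.pyGetD p.2 (-1) ""
      if field = "" ∨ field = "_" ∨ field = "*" then acc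
      else acc ++ ((PySem.Str.split? field ";").getD [field]).map
            (fun e => ((pvParse e).1, (pvParse e).2, p.1))) acc
      = acc ++ l.flatMap pvTok := by
  induction l generalizing acc with
  | nil => simp
  | cons p l ih =>
    simp only [List.foldl_cons, List.flatMap_cons]
    rw [ih]
    unfold pvTok
    by_cases h : PySem.List.pyGetD p.2 (-1) "" = "" ∨ PySem.List.pyGetD p.2 (-1) "" = "_"
        ∨ PySem.List.pyGetD p.2 (-1) "" = "*" <;> simp [h, List.append_assoc]

theorem pvA_flat (l : List (Int × List String)) (d : PySem.Dict String (Option String × List Int)) :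
    l.foldl (fun mwes p =>
      let last := PySem.List.pyGetD p.2 (-1) ""
      if last = "" ∨ last = "_" ∨ last = "*" then mwes
      else ((PySem.Str.split? last ";").getD [last]).foldl
            (fun mwes e => pvAstep mwes ((pvParse e).1, (pvParse e).2, p.1)) mwes) d
      = (l.flatMap pvTok).foldl pvAstep d := by
  induction l generalizing d with
  | nil => simp
  | cons p l ih =>
    simp only [List.foldl_cons, List.flatMap_cons, List.foldl_append]
    rw [ih]
    congr 1
    unfold pvTok
    by_cases h : PySem.List.pyGetD p.2 (-1) "" = "" ∨ PySem.List.pyGetD p.2 (-1) "" = "_"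
        ∨ PySem.List.pyGetD p.2 (-1) "" = "*"
    · simp [h]
    · simp [h, List.foldl_map]

-- ===== VERDICT (by name: the statement is the Claim_ definition above) =====
theorem find_mwes_spec : Claim_equal_find_mwes := by
  intro sentence _ _
  unfold Spec_find_mwes find_mwes find_mwes_alt
  rw [pvA_flat, pvB_triples, List.nil_append, pvA_invariant]
  exact congrArg PySem.Dict.items (pvB_invariant _ _).symm
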